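-- pv_equiv track=rewrite | github.com/vipaka2/passmu | main.py | insert_symbols_everywhere
-- ===== SOURCE A (Python) =====
-- import itertools
--
-- def insert_symbols_everywhere(word, symbols, max_symbols):
--     if not symbols:
--         return {word}
--     positions = list(range(len(word) + 1))
--     results = {word}
--
--     for n in range(1, max_symbols + 1):
--         for sym_seq in itertools.product(symbols, repeat=n):
--             for pos_seq in itertools.combinations_with_replacement(positions, n):
--                 chars = list(word)
--                 offset = 0
--                 for index, symbol in sorted(zip(pos_seq, sym_seq)):
--                     chars.insert(index + offset, symbol)
--                     offset += 1
--                 results.add(''.join(chars))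
--     return results
-- ===== SOURCE B (Python) =====
-- import itertools
--
-- def insert_symbols_everywhere(word, symbols, max_symbols):
--     # Alternative enumeration: positions are enumerated as count-compositions over
--     # the len(word)+1 gaps (no combinations_with_replacement), and each candidate is
--     # built by interleaving value-sorted per-gap blocks with the word's characters
--     # (no sorted(zip(...)) / insert-with-offset pass).
--     if not symbols:
--         return {word}
--     gaps = len(word) + 1
--     results = {word}
--
--     def compositions(n, parts):
--         # all ways to split n into `parts` non-negative counts, first count descending
--         if parts == 1:
--             yield (n,)
--         else:
--             for first in range(n, -1, -1):
--                 for rest in compositions(n - first, parts - 1):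
--                     yield (first,) + rest
--
--     for n in range(1, max_symbols + 1):
--         for sym_seq in itertools.product(symbols, repeat=n):
--             for counts in compositions(n, gaps):
--                 pieces = []
--                 i = 0
--                 for g, c in enumerate(counts):
--                     pieces.extend(sorted(sym_seq[i:i + c]))
--                     i += c
--                     if g < len(word):
--                         pieces.append(word[g])
--                 results.add(''.join(pieces))
--     return results
-- ===== Notes on version B (the rewrite author's own statement) =====
-- stated objective: alternative
-- what changed: Positions are enumerated as count-compositions over the len(word)+1 gaps instead of combinations_with_replacement of position tuples, and each candidate string is built in one pass by interleaving value-sorted per-gap symbol blocks with the word's characters instead of sorting (position,symbol) pairs and repeatedly list.insert-ing with a running offset.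
import Mathlib
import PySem

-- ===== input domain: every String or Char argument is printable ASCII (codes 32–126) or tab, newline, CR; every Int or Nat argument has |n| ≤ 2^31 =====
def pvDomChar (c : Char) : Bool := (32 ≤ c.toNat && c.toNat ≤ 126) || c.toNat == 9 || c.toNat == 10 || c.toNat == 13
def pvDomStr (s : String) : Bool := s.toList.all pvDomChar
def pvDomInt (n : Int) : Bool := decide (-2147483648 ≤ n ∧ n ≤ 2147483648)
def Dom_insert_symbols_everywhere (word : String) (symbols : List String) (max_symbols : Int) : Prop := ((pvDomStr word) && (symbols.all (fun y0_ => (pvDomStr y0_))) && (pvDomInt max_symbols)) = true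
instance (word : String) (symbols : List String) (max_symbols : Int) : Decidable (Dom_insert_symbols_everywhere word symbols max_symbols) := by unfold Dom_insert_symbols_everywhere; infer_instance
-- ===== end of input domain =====

-- B enumerates insertion positions as count-compositions over the word's gaps and builds each
-- candidate by interleaving value-sorted per-gap blocks with the word's characters (alternative
-- decomposition, same result set).


-- ===== PORT A =====
-- itertools.product(symbols, repeat=n) in CPython's order (first coordinate varies slowest);
-- shared by both ports (Source B makes the same itertools.product call).
def pvProduct (symbols : List String) : Nat → List (List String)
  | 0 => [[]]
  | n+1 => symbols.flatMap (fun x => (pvProduct symbols n).map (fun t => x :: t))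

-- itertools.combinations_with_replacement(xs, n) in CPython's (lexicographic) order
def pvCWR : List Int → Nat → List (List Int)
  | _, 0 => [[]]
  | [], _+1 => []
  | x :: xs, n+1 => ((pvCWR (x :: xs) n).map (fun t => x :: t)) ++ pvCWR xs (n+1)
termination_by xs n => (n, xs.length)

-- loop body of A: chars = list(word); insert each (index, symbol) of sorted(zip(pos_seq, sym_seq))
-- at index+offset; ''.join(chars)
def pvBuildA (word : String) (sym_seq : List String) (pos_seq : List Int) : String :=
  let st := (PySem.List.sorted2 (pos_seq.zip sym_seq) Prod.fst Prod.snd).foldl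
    (fun (st : List String × Int) pr => (PySem.List.insert st.1 (pr.1 + st.2) pr.2, st.2 + 1))
    (word.toList.map (fun c => String.ofList [c]), 0)
  PySem.Str.join "" st.1

def insert_symbols_everywhere (word : String) (symbols : List String) (max_symbols : Int) : List String :=
  if symbols = [] then [word] else
    let positions : List Int := PySem.List.pyRange 0 (PySem.Str.len word + 1) 1
    (PySem.List.pyRange 1 (max_symbols + 1) 1).foldl
      (fun results n =>
        (pvProduct symbols n.toNat).foldl
          (fun results sym_seq =>
            (pvCWR positions n.toNat).foldl
              (fun results pos_seq => PySem.Set.add results (pvBuildA word sym_seq pos_seq))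
              results)
          results)
      (PySem.Set.ofList [word])

-- ===== PORT B =====
-- compositions(n, parts): n split into `parts` non-negative counts, first count descending
def pvComps : Int → Nat → List (List Int)
  | _, 0 => []
  | n, 1 => [[n]]
  | n, p+2 => (PySem.List.pyRange n (-1) (-1)).flatMap
      (fun first => (pvComps (n - first) (p+1)).map (fun rest => first :: rest))
termination_by _ p => p

-- loop body of B: pieces built gap by gap — value-sorted slice of sym_seq, then the word char
-- (word[g] is in range exactly when g < len(word), which the branch tests)
def pvBuildB (word : String) (sym_seq : List String) (counts : List Int) : String :=
  let st := (PySem.List.enumerate counts).foldl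
    (fun (st : List String × Int) gc =>
      let pieces := st.1 ++ PySem.List.sorted (PySem.List.slice sym_seq (some st.2) (some (st.2 + gc.2))) (fun s => s)
      let i := st.2 + gc.2
      let pieces := if gc.1 < PySem.Str.len word
        then pieces ++ [((PySem.Str.pyGet? word gc.1).map (fun c => String.ofList [c])).getD ""]
        else pieces
      (pieces, i))
    ([], 0)
  PySem.Str.join "" st.1

def insert_symbols_everywhere_alt (word : String) (symbols : List String) (max_symbols : Int) : List String :=
  if symbols = [] then [word] else
    let gaps : Int := PySem.Str.len word + 1
    (PySem.List.pyRange 1 (max_symbols + 1) 1).foldl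
      (fun results n =>
        (pvProduct symbols n.toNat).foldl
          (fun results sym_seq =>
            (pvComps n gaps.toNat).foldl
              (fun results counts => PySem.Set.add results (pvBuildB word sym_seq counts))
              results)
          results)
      (PySem.Set.ofList [word])

-- ===== PRECONDITION & SPEC =====
def Spec_insert_symbols_everywhere (word : String) (symbols : List String) (max_symbols : Int) (out : List String) : Prop := out = insert_symbols_everywhere_alt word symbols max_symbols
instance (word : String) (symbols : List String) (max_symbols : Int) (out : List String) : Decidable (Spec_insert_symbols_everywhere word symbols max_symbols out) := by unfold Spec_insert_symbols_everywhere; infer_instance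

-- ===== CLAIM (what is proved, stated in full; the proofs are below) =====
def Claim_equal_insert_symbols_everywhere : Prop := ∀ (word : String) (symbols : List String) (max_symbols : Int), Dom_insert_symbols_everywhere word symbols max_symbols → Spec_insert_symbols_everywhere word symbols max_symbols (insert_symbols_everywhere word symbols max_symbols)

-- ===== LEMMAS AND PROOFS =====

-- proof-side vocabulary
def pvMk1 (c : Char) : String := String.ofList [c]
def pvChunk (l : List String) : List String := PySem.List.sorted l (fun s => s)

-- the common shape of one candidate's piece list: value-sorted blocks interleaved with word chars
def pvCanon : List Char → List String → List Int → List String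
  | _, _, [] => []
  | w, ss, c :: cs =>
    pvChunk (ss.take c.toNat) ++
      match w with
      | [] => []
      | ch :: w' => pvMk1 ch :: pvCanon w' (ss.drop c.toNat) cs

def pvDesc (n : Nat) : List Nat := (List.range (n+1)).map (fun k => n - k)

-- reference enumeration of all candidates' piece lists (gap counts descending, like both ports)
def pvE : List Char → Nat → List String → List (List String)
  | [], _, ss => [pvChunk ss]
  | ch :: w', n, ss =>
      (pvDesc n).flatMap (fun c => (pvE w' (n - c) (ss.drop c)).map
        (fun t => pvChunk (ss.take c) ++ pvMk1 ch :: t))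




-- named forms of the two fold bodies (definitionally equal to the lambdas in the ports)
def pvStepA (st : List String × Int) (pr : Int × String) : List String × Int :=
  (PySem.List.insert st.1 (pr.1 + st.2) pr.2, st.2 + 1)

def pvStepB (word : String) (ss : List String) (st : List String × Int) (gc : Int × Int) :
    List String × Int :=
  let pieces := st.1 ++ PySem.List.sorted (PySem.List.slice ss (some st.2) (some (st.2 + gc.2))) (fun s => s)
  let i := st.2 + gc.2
  let pieces := if gc.1 < PySem.Str.len word
    then pieces ++ [((PySem.Str.pyGet? word gc.1).map (fun c => String.ofList [c])).getD ""]
    else pieces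
  (pieces, i)

theorem pvStepA_def (a : List String) (b : Int) (p : Int) (s : String) :
    pvStepA (a, b) (p, s) = (PySem.List.insert a (p + b) s, b + 1) := rfl


theorem pvProduct_length {symbols : List String} : ∀ {n : Nat} {ss : List String},
    ss ∈ pvProduct symbols n → ss.length = n := by
  intro n
  induction n with
  | zero => intro ss h; simp [pvProduct] at h; simp [h]
  | succ k ih =>
    intro ss h
    simp only [pvProduct, List.mem_flatMap, List.mem_map] at h
    obtain ⟨x, _, t, ht, rfl⟩ := h
    simp [ih ht]

theorem pvSorted2_sorted (xs : List (Int × String)) :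
    PySem.List.sorted2 xs Prod.fst Prod.snd
      = PySem.List.sorted xs (fun p => (toLex p : Lex (Int × String))) := by
  show List.foldl _ [] xs = List.foldl _ [] xs
  congr 1
  funext acc x
  congr 1
  funext a b
  by_cases h1 : a.1 < b.1
  · simp [h1, Prod.Lex.lt_iff]
  · by_cases h2 : b.1 < a.1
    · have : ¬ (toLex a < toLex b) := by
        rw [Prod.Lex.lt_iff]
        simp only [ofLex_toLex, not_or, not_and, not_lt]
        exact ⟨le_of_not_gt h1, fun h => absurd (h ▸ h2) (lt_irrefl _)⟩
      simp [h1, h2, this]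
    · have he : a.1 = b.1 := le_antisymm (le_of_not_gt h2) (le_of_not_gt h1)
      by_cases h3 : a.2 < b.2
      · have : toLex a < toLex b := by rw [Prod.Lex.lt_iff]; exact Or.inr ⟨he, h3⟩
        simp [h1, h2, h3, this]
      · have : ¬ (toLex a < toLex b) := by
          rw [Prod.Lex.lt_iff]
          simp only [ofLex_toLex, not_or, not_and, not_lt]
          exact ⟨le_of_eq he.symm, fun _ => le_of_not_gt h3⟩
        simp [h1, h2, h3, this]

theorem pvSorted2_eq (xs ys : List (Int × String)) (h : ys.Perm xs)
    (hp : ys.Pairwise (fun a b => a.1 < b.1 ∨ (a.1 = b.1 ∧ a.2 ≤ b.2))) :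
    PySem.List.sorted2 xs Prod.fst Prod.snd = ys := by
  rw [pvSorted2_sorted]
  apply PySem.List.eq_of_perm_of_pairwise_le_of_injective
      (key := fun p : Int × String => (toLex p : Lex (Int × String)))
  · exact fun a b hab => hab
  · exact (PySem.List.sorted_perm xs _ false).trans h.symm
  · exact PySem.List.sorted_pairwise xs _
  · refine hp.imp ?_
    intro a b hab
    rcases hab with h1 | ⟨h1, h2⟩
    · exact le_of_lt (by rw [Prod.Lex.lt_iff]; exact Or.inl h1)
    · rcases lt_or_eq_of_le h2 with h2 | h2
      · exact le_of_lt (by rw [Prod.Lex.lt_iff]; exact Or.inr ⟨h1, h2⟩)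
      · have : a = b := Prod.ext h1 h2
        exact le_of_eq (by rw [this])

theorem pvZipRep (g : Int) : ∀ (c : Nat) (l : List String), l.length = c →
    (List.replicate c g).zip l = l.map (fun s => (g, s)) := by
  intro c
  induction c with
  | zero => intro l hl; simp [List.eq_nil_of_length_eq_zero hl]
  | succ k ih =>
    intro l hl
    cases l with
    | nil => simp at hl
    | cons x t => simp [List.replicate_succ, ih t (by simpa using hl)]

theorem pvFoldBlock (chunkL : List String) : ∀ (pre suf : List String) (g off : Int),
    g + off = pre.length →
    (chunkL.map (fun s => (g, s))).foldl pvStepA (pre ++ suf, off)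
      = (pre ++ chunkL ++ suf, off + chunkL.length) := by
  induction chunkL with
  | nil => intro pre suf g off h; simp
  | cons s rest ih =>
    intro pre suf g off h
    have hidx : g + off = ((pre.length : Nat) : Int) := by exact_mod_cast h
    have hins : PySem.List.insert (pre ++ suf) (g + off) s = pre ++ s :: suf := by
      rw [hidx, PySem.List.insert_natCast (pre ++ suf) pre.length s (by simp)]
      simp
    simp only [List.map_cons, List.foldl_cons, pvStepA_def, hins]
    have : pre ++ s :: suf = (pre ++ [s]) ++ suf := by simp
    rw [this, ih (pre ++ [s]) suf g (off + 1) (by simp; omega)]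
    refine Prod.ext ?_ ?_
    · simp
    · simp; omega

theorem pvCWR_singleton (x : Int) : ∀ n, pvCWR [x] n = [List.replicate n x] := by
  intro n
  induction n with
  | zero => simp [pvCWR]
  | succ k ih => simp [pvCWR, ih, List.replicate_succ]

theorem pvDesc_succ' (n : Nat) : pvDesc (n+1) = (pvDesc n).map (· + 1) ++ [0] := by
  unfold pvDesc
  rw [List.range_succ, List.map_append, List.map_map]
  congr 1
  · apply List.map_congr_left
    intro k hk
    simp at hk ⊢
    omega
  · simp

theorem pvCWR_split (x : Int) (xs : List Int) : ∀ n,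
    pvCWR (x :: xs) n
      = (pvDesc n).flatMap (fun c => (pvCWR xs (n - c)).map (fun t => List.replicate c x ++ t)) := by
  intro n
  induction n with
  | zero => simp [pvCWR, pvDesc]
  | succ k ih =>
    rw [show pvCWR (x :: xs) (k+1) = (pvCWR (x :: xs) k).map (fun t => x :: t) ++ pvCWR xs (k+1) from by
      simp [pvCWR]]
    rw [ih, pvDesc_succ', List.flatMap_append, List.flatMap_map, List.map_flatMap]
    congr 1
    · congr 1
      funext c
      rw [List.map_map]
      have h2 : k + 1 - (c + 1) = k - c := by omega
      rw [h2]
      apply List.map_congr_left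
      intro t _
      simp [List.replicate_succ]
    · simp

theorem pvStep1 (g : Int) (c : Nat) (t : List Int) (ss : List String)
    (ht : ∀ i ∈ t, g < i) (hss : ss.length = c + t.length) :
    PySem.List.sorted2 ((List.replicate c g ++ t).zip ss) Prod.fst Prod.snd
      = (pvChunk (ss.take c)).map (fun s => (g, s))
        ++ PySem.List.sorted2 (t.zip (ss.drop c)) Prod.fst Prod.snd := by
  apply pvSorted2_eq
  · have hsplit : (List.replicate c g ++ t).zip ss
        = (ss.take c).map (fun s => (g, s)) ++ t.zip (ss.drop c) := by
      conv_lhs => rw [← List.take_append_drop c ss]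
      rw [List.zip_append (by simp; omega), pvZipRep g c (ss.take c) (by simp; omega)]
    rw [hsplit]
    exact ((PySem.List.sorted_perm (ss.take c) _ false).map _).append
      (PySem.List.sorted2_perm (t.zip (ss.drop c)) _ _ false)
  · rw [List.pairwise_append]
    refine ⟨?_, ?_, ?_⟩
    · rw [List.pairwise_map]
      exact (PySem.List.sorted_pairwise (ss.take c) (fun s => s)).imp
        (fun hab => Or.inr ⟨rfl, hab⟩)
    · rw [pvSorted2_sorted]
      refine (PySem.List.sorted_pairwise (t.zip (ss.drop c)) _).imp ?_
      intro a b hab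
      rcases lt_or_eq_of_le hab with hlt | heq
      · rw [Prod.Lex.lt_iff] at hlt
        simp only [ofLex_toLex] at hlt
        rcases hlt with h | ⟨h1, h2⟩
        · exact Or.inl h
        · exact Or.inr ⟨h1, le_of_lt h2⟩
      · have hab' : a = b := by simpa using congrArg ofLex heq
        rw [hab']
        exact Or.inr ⟨rfl, le_refl _⟩
    · intro a ha b hb
      rw [List.mem_map] at ha
      obtain ⟨s, _, rfl⟩ := ha
      have hb' : b ∈ t.zip (ss.drop c) :=
        ((PySem.List.sorted2_perm (t.zip (ss.drop c)) _ _ false).mem_iff).mp hb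
      obtain ⟨b1, b2⟩ := b
      exact Or.inl (ht _ (List.of_mem_zip hb').1)





theorem pvCWR_mem : ∀ (xs : List Int) (n : Nat) (ps : List Int), ps ∈ pvCWR xs n →
    ps.length = n ∧ ∀ i ∈ ps, i ∈ xs := by
  intro xs n
  induction xs, n using pvCWR.induct with
  | case1 xs => intro ps h; simp [pvCWR] at h; simp [h]
  | case2 n => intro ps h; simp [pvCWR] at h
  | case3 x xs n ih1 ih2 =>
    intro ps h
    rw [show pvCWR (x :: xs) (n+1)
        = ((pvCWR (x :: xs) n).map (fun t => x :: t)) ++ pvCWR xs (n+1) from by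
      simp [pvCWR]] at h
    rw [List.mem_append] at h
    rcases h with h | h
    · rw [List.mem_map] at h
      obtain ⟨t, ht, rfl⟩ := h
      obtain ⟨hl, hm⟩ := ih1 t ht
      refine ⟨by simp [hl], ?_⟩
      intro i hi
      rcases List.mem_cons.mp hi with rfl | hi
      · exact List.mem_cons_self ..
      · exact hm i hi
    · obtain ⟨hl, hm⟩ := ih2 ps h
      exact ⟨hl, fun i hi => List.mem_cons_of_mem x (hm i hi)⟩

theorem pvComps_mem : ∀ (n : Int) (p : Nat), 0 ≤ n → ∀ cs ∈ pvComps n p,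
    cs.length = p ∧ ∀ c ∈ cs, 0 ≤ c ∧ c ≤ n := by
  intro n p
  induction n, p using pvComps.induct with
  | case1 n => intro _ cs h; simp [pvComps] at h
  | case2 n =>
    intro hn cs h
    simp only [pvComps, List.mem_singleton] at h
    subst h
    refine ⟨rfl, ?_⟩
    intro c hc
    rw [List.mem_singleton] at hc
    subst hc
    exact ⟨hn, le_refl _⟩
  | case3 n p ih =>
    intro hn cs h
    rw [show pvComps n (p+2) = (PySem.List.pyRange n (-1) (-1)).flatMap
        (fun first => (pvComps (n - first) (p+1)).map (fun rest => first :: rest)) from by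
      simp [pvComps]] at h
    rw [List.mem_flatMap] at h
    obtain ⟨first, hf, hcs⟩ := h
    rw [PySem.List.pyRange_neg_one, List.mem_map] at hf
    obtain ⟨k, hk, rfl⟩ := hf
    rw [List.mem_range] at hk
    have hk' : (k : Int) ≤ n := by omega
    rw [List.mem_map] at hcs
    obtain ⟨rest, hrest, rfl⟩ := hcs
    obtain ⟨hl, hm⟩ := ih (n - (k : Int)) (by omega) rest hrest
    refine ⟨by simp [hl], ?_⟩
    intro c hc
    rcases List.mem_cons.mp hc with rfl | hc
    · omega
    · have := hm c hc
      omega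

theorem pvMainA (word : String) :
    ∀ (w : List Char) (g n : Nat) (ss pre : List String), ss.length = n →
    word.toList.drop g = w → g + w.length = word.toList.length →
    (pvCWR (PySem.List.pyRange (g : Int) ((word.toList.length : Int) + 1) 1) n).map
      (fun ps => ((PySem.List.sorted2 (ps.zip ss) Prod.fst Prod.snd).foldl pvStepA
          (pre ++ w.map pvMk1, (pre.length : Int) - g)).1)
      = (pvE w n ss).map (fun t => pre ++ t) := by
  intro w
  induction w with
  | nil =>
    intro g n ss pre hss hdrop hglen
    subst hss
    have hgL : (word.toList.length : Int) = (g : Int) := by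
      simp only [List.length_nil, Nat.add_zero] at hglen
      exact_mod_cast hglen.symm
    rw [hgL, PySem.List.pyRange_one_singleton, pvCWR_singleton]
    simp only [List.map_cons, List.map_nil]
    congr 1
    have hsor : PySem.List.sorted2 ((List.replicate ss.length (g:Int)).zip ss) Prod.fst Prod.snd
        = (pvChunk (ss.take ss.length)).map (fun s => ((g:Int), s)) := by
      rw [← List.append_nil (List.replicate ss.length (g:Int)),
        pvStep1 (g:Int) ss.length [] ss (by intro i hi; simp at hi) (by simp)]
      simp [PySem.List.sorted2]
    rw [hsor]
    rw [pvFoldBlock (pvChunk (ss.take ss.length)) pre [] (g:Int) ((pre.length : Int) - g)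
      (by ring)]
    simp [List.take_length]
  | cons ch w' ih =>
    intro g n ss pre hss hdrop hglen
    have hgL : g < word.toList.length := by
      simp only [List.length_cons] at hglen
      omega
    rw [show PySem.List.pyRange (g:Int) ((word.toList.length:Int)+1) 1
        = (g:Int) :: PySem.List.pyRange ((g:Int)+1) ((word.toList.length:Int)+1) 1 from
      PySem.List.pyRange_one_cons (by exact_mod_cast Nat.lt_succ_of_lt hgL)]
    rw [pvCWR_split, List.map_flatMap]
    rw [show pvE (ch :: w') n ss = (pvDesc n).flatMap (fun c =>
      (pvE w' (n - c) (ss.drop c)).map (fun t => pvChunk (ss.take c) ++ pvMk1 ch :: t)) from rfl]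
    rw [List.map_flatMap]
    apply List.flatMap_congr
    intro c hc
    have hcn : c ≤ n := by
      unfold pvDesc at hc
      rw [List.mem_map] at hc
      obtain ⟨k, hk, rfl⟩ := hc
      omega
    rw [List.map_map]
    set pre' := pre ++ pvChunk (ss.take c) ++ [pvMk1 ch] with hpre'
    have hchunklen : (pvChunk (ss.take c)).length = c := by
      simp [pvChunk, PySem.List.length_sorted, List.length_take]
      omega
    have hrec : ∀ t ∈ pvCWR (PySem.List.pyRange ((g:Int)+1) ((word.toList.length:Int)+1) 1) (n - c),
        ((fun ps => ((PySem.List.sorted2 (ps.zip ss) Prod.fst Prod.snd).foldl pvStepA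
            (pre ++ (ch :: w').map pvMk1, (pre.length : Int) - g)).1) ∘
          (fun t => List.replicate c (g:Int) ++ t)) t
        = ((PySem.List.sorted2 (t.zip (ss.drop c)) Prod.fst Prod.snd).foldl pvStepA
            (pre' ++ w'.map pvMk1, (pre'.length : Int) - ((g:Nat)+1:Nat))).1 := by
      intro t htm
      obtain ⟨htl, htmem⟩ := pvCWR_mem _ _ t htm
      have htgt : ∀ i ∈ t, (g:Int) < i := by
        intro i hi
        have := htmem i hi
        rw [PySem.List.mem_pyRange_one] at this
        omega
      show ((PySem.List.sorted2 ((List.replicate c (g:Int) ++ t).zip ss) Prod.fst Prod.snd).foldl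
          pvStepA (pre ++ (ch :: w').map pvMk1, (pre.length : Int) - g)).1 = _
      rw [pvStep1 (g:Int) c t ss htgt (by omega)]
      rw [List.foldl_append]
      rw [show pre ++ (ch :: w').map pvMk1 = pre ++ (pvMk1 ch :: w'.map pvMk1) from by simp]
      rw [pvFoldBlock (pvChunk (ss.take c)) pre (pvMk1 ch :: w'.map pvMk1) (g:Int)
        ((pre.length : Int) - g) (by ring)]
      have hstate1 : pre ++ pvChunk (ss.take c) ++ (pvMk1 ch :: List.map pvMk1 w')
          = pre' ++ List.map pvMk1 w' := by
        rw [hpre']; simp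
      have hstate2 : ((pre.length : Int) - g) + ((pvChunk (ss.take c)).length : Int)
          = (pre'.length : Int) - ((g:Nat)+1:Nat) := by
        rw [hpre']
        simp [hchunklen]
        ring
      rw [hstate1, hstate2]
    rw [List.map_congr_left hrec]
    rw [show ((g:Int) + 1) = (((g+1 : Nat)) : Int) from by push_cast; ring]
    rw [ih (g+1) (n-c) (ss.drop c) pre' (by simp [hss]) (by
        rw [← List.tail_drop, hdrop]; rfl) (by
        simp only [List.length_cons] at hglen
        omega)]
    rw [List.map_map]
    apply List.map_congr_left
    intro t _
    rw [hpre']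
    simp

theorem pvMainB (word : String) (ss : List String) :
    ∀ (cs : List Int) (g i : Nat) (pre : List String),
    (∀ c ∈ cs, 0 ≤ c) → g + cs.length ≤ word.toList.length + 1 →
    ((PySem.List.enumerate cs (g : Int)).foldl (pvStepB word ss) (pre, (i : Int))).1
      = pre ++ pvCanon (word.toList.drop g) (ss.drop i) cs := by
  intro cs
  induction cs with
  | nil =>
    intro g i pre _ _
    simp [PySem.List.enumerate, pvCanon]
  | cons c cs' ih =>
    intro g i pre hpos hlen
    have hc : 0 ≤ c := hpos c (List.mem_cons_self ..)
    rw [PySem.List.enumerate_cons, List.foldl_cons]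
    have hslice : PySem.List.slice ss (some (i:Int)) (some ((i:Int) + c))
        = (ss.drop i).take c.toNat := by
      rw [show (i:Int) + c = ((i + c.toNat : Nat) : Int) from by omega, PySem.List.slice_natCast]
      congr 1
      omega
    have hi' : (i : Int) + c = ((i + c.toNat : Nat) : Int) := by omega
    by_cases hg : g < word.toList.length
    · have hdrop := List.drop_eq_getElem_cons (l := word.toList) hg
      have hstep : pvStepB word ss (pre, (i : Int)) ((g:Int), c)
          = (pre ++ pvChunk ((ss.drop i).take c.toNat) ++ [pvMk1 (word.toList[g])],
             ((i + c.toNat : Nat) : Int)) := by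
        simp only [pvStepB, hslice]
        rw [if_pos (by rw [PySem.Str.len_eq]; exact_mod_cast hg)]
        rw [PySem.Str.pyGet?_natCast, List.getElem?_eq_getElem hg]
        refine Prod.ext ?_ ?_
        · simp [pvChunk, pvMk1]
        · simpa using hi'
      rw [hstep]
      rw [show ((g:Int) + 1) = (((g+1 : Nat)) : Int) from by push_cast; ring]
      rw [ih (g+1) (i + c.toNat) _ (fun c' hc' => hpos c' (List.mem_cons_of_mem _ hc'))
        (by simp only [List.length_cons] at hlen; omega)]
      rw [hdrop]
      rw [show pvCanon (word.toList[g] :: List.drop (g+1) word.toList) (ss.drop i) (c :: cs')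
          = pvChunk ((ss.drop i).take c.toNat) ++ pvMk1 (word.toList[g])
            :: pvCanon (List.drop (g+1) word.toList) ((ss.drop i).drop c.toNat) cs' from rfl]
      rw [List.drop_drop]
      simp
    · have hg' : word.toList.length ≤ g := le_of_not_gt hg
      have hcs' : cs' = [] := by
        have : cs'.length = 0 := by simp only [List.length_cons] at hlen; omega
        exact List.eq_nil_of_length_eq_zero this
      subst hcs'
      have hstep : pvStepB word ss (pre, (i : Int)) ((g:Int), c)
          = (pre ++ pvChunk ((ss.drop i).take c.toNat), ((i + c.toNat : Nat) : Int)) := by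
        simp only [pvStepB, hslice]
        rw [if_neg (by rw [PySem.Str.len_eq]; omega)]
        refine Prod.ext ?_ ?_
        · simp [pvChunk]
        · simpa using hi'
      rw [hstep]
      rw [show PySem.List.enumerate ([] : List Int) ((g:Int)+1) = [] from rfl, List.foldl_nil]
      rw [List.drop_eq_nil_of_le hg']
      rw [show pvCanon ([] : List Char) (ss.drop i) [c]
          = pvChunk ((ss.drop i).take c.toNat) ++ [] from rfl]
      simp

theorem pvP1 : ∀ (w : List Char) (n : Nat) (ss : List String), ss.length = n →
    (pvComps (n : Int) (w.length + 1)).map (fun cs => pvCanon w ss cs) = pvE w n ss := by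
  intro w
  induction w with
  | nil =>
    intro n ss hss
    rw [show pvComps (n:Int) (List.length ([] : List Char) + 1) = [[(n:Int)]] from by
      simp [pvComps]]
    rw [show pvE [] n ss = [pvChunk ss] from rfl]
    simp only [List.map_cons, List.map_nil]
    congr 1
    rw [show pvCanon [] ss [(n:Int)] = pvChunk (ss.take (n:Int).toNat) ++ [] from rfl]
    rw [Int.toNat_natCast, ← hss, List.take_length, List.append_nil]
  | cons ch w' ih =>
    intro n ss hss
    rw [show pvComps (n:Int) (List.length (ch :: w') + 1)
        = (PySem.List.pyRange (n:Int) (-1) (-1)).flatMap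
          (fun first => (pvComps ((n:Int) - first) (w'.length+1)).map (fun rest => first :: rest))
        from by simp [pvComps]]
    rw [PySem.List.pyRange_neg_one]
    rw [show (((n:Int) - (-1)).toNat) = n + 1 from by omega]
    rw [List.flatMap_map, List.map_flatMap]
    rw [show pvE (ch :: w') n ss = (pvDesc n).flatMap (fun c =>
      (pvE w' (n - c) (ss.drop c)).map (fun t => pvChunk (ss.take c) ++ pvMk1 ch :: t)) from rfl]
    unfold pvDesc
    rw [List.flatMap_map]
    apply List.flatMap_congr
    intro k hk
    rw [List.mem_range] at hk
    have hkn : k ≤ n := by omega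
    have e1 : (n:Int) - ((n:Int) - (k:Nat)) = ((k:Nat):Int) := by ring
    rw [e1, List.map_map]
    have e2 : ((n:Int) - (k:Nat)).toNat = n - k := by omega
    have e4 : n - (n - k) = k := by omega
    rw [e4]
    rw [← ih k (ss.drop (n-k)) (by simp [hss]; omega)]
    rw [List.map_map]
    apply List.map_congr_left
    intro rest _
    show pvCanon (ch :: w') ss (((n:Int) - (k:Nat)) :: rest) = _
    rw [show pvCanon (ch :: w') ss (((n:Int) - (k:Nat)) :: rest)
        = pvChunk (ss.take ((n:Int) - (k:Nat)).toNat)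
          ++ pvMk1 ch :: pvCanon w' (ss.drop ((n:Int) - (k:Nat)).toNat) rest from rfl]
    rw [e2]
    rfl

theorem pvKey (word : String) (n : Nat) (ss : List String) (hss : ss.length = n) :
    (pvCWR (PySem.List.pyRange 0 ((word.toList.length : Int) + 1) 1) n).map (pvBuildA word ss)
      = (pvComps (n : Int) (word.toList.length + 1)).map (pvBuildB word ss) := by
  have hA := pvMainA word word.toList 0 n ss [] hss (by simp) (by simp)
  have hA' : (pvCWR (PySem.List.pyRange 0 ((word.toList.length : Int) + 1) 1) n).map
      (pvBuildA word ss)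
      = ((pvE word.toList n ss).map (fun t => [] ++ t)).map (PySem.Str.join "") := by
    simp only [Nat.cast_zero] at hA
    rw [← hA, List.map_map]
    apply List.map_congr_left
    intro ps _
    rfl
  have hB' : (pvComps (n : Int) (word.toList.length + 1)).map (pvBuildB word ss)
      = ((pvE word.toList n ss).map (fun t => [] ++ t)).map (PySem.Str.join "") := by
    rw [show ((pvE word.toList n ss).map (fun t => [] ++ t)) = pvE word.toList n ss from by
      simp]
    rw [← pvP1 word.toList n ss hss, List.map_map]
    apply List.map_congr_left
    intro cs hcs
    obtain ⟨hl, hm⟩ := pvComps_mem (n:Int) (word.toList.length + 1) (by omega) cs hcs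
    have := pvMainB word ss cs 0 0 [] (fun c hc => (hm c hc).1) (by omega)
    simp only [Nat.cast_zero] at this
    show PySem.Str.join "" ((PySem.List.enumerate cs 0).foldl (pvStepB word ss) ([], (0:Int))).1
      = (PySem.Str.join "" ∘ fun cs => pvCanon word.toList ss cs) cs
    rw [this]
    simp
  rw [hA', hB']

-- ===== VERDICT (by name: the statement is the Claim_ definition above) =====
theorem insert_symbols_everywhere_spec : Claim_equal_insert_symbols_everywhere := by
  unfold Claim_equal_insert_symbols_everywhere
  intro word symbols max_symbols _
  unfold Spec_insert_symbols_everywhere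
  unfold insert_symbols_everywhere insert_symbols_everywhere_alt
  by_cases hs : symbols = []
  · simp [hs]
  · simp only [if_neg hs]
    apply PySem.List.foldl_congr_mem
    intro res n hn
    apply PySem.List.foldl_congr_mem
    intro res2 ss hss
    rw [← List.foldl_map (f := pvBuildA word ss) (g := PySem.Set.add),
        ← List.foldl_map (f := pvBuildB word ss) (g := PySem.Set.add)]
    congr 1
    have h1 : PySem.Str.len word = (word.toList.length : Int) := PySem.Str.len_eq word
    have hn1 : (1 : Int) ≤ n := (PySem.List.mem_pyRange_one.mp hn).1
    have h3 : ((n.toNat : Nat) : Int) = n := by omega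
    rw [h1]
    rw [show (((word.toList.length : Int)) + 1).toNat = word.toList.length + 1 from by omega]
    rw [show pvComps n (word.toList.length + 1)
        = pvComps ((n.toNat : Nat) : Int) (word.toList.length + 1) from by rw [h3]]
    exact pvKey word n.toNat ss (pvProduct_length hss)
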